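-- pv_equiv track=rewrite | github.com/snadboy/sb-traefik-http-provider | traefik_transformer.py | extract_port_from_expose
-- ===== SOURCE A (Python) =====
-- from typing import Dict, Any, List, Optional, Tuple
--
-- def extract_port_from_expose(exposed_ports: Dict[str, Any]) -> str:
--     """Extract the most likely port from Docker's ExposedPorts"""
--     if not exposed_ports:
--         return "80"
--
--     # Priority order for common ports
--     priority_ports = ['80/tcp', '8080/tcp', '3000/tcp', '8000/tcp', '5000/tcp', '443/tcp']
--
--     for port in priority_ports:
--         if port in exposed_ports:
--             return port.split('/')[0]
--
--     # Return first available port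
--     first_port = list(exposed_ports.keys())[0]
--     return first_port.split('/')[0]
-- ===== SOURCE B (Python) =====
-- def extract_port_from_expose(exposed_ports):
--     """Extract the most likely port from Docker's ExposedPorts"""
--     if not exposed_ports:
--         return "80"
--
--     priority_ports = ['80/tcp', '8080/tcp', '3000/tcp', '8000/tcp', '5000/tcp', '443/tcp']
--
--     # Rank table: position in the priority list, or len(priority_ports) if absent.
--     rank = {p: i for i, p in enumerate(priority_ports)}
--     # One pass over the dict's keys: min picks the earliest-priority present port,
--     # or (all ranks maximal) the first key in insertion order.
--     best = min(exposed_ports, key=lambda p: rank.get(p, len(priority_ports)))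
--     return best.split('/')[0]
-- ===== Notes on version B (the rewrite author's own statement) =====
-- stated objective: alternative
-- what changed: Instead of scanning the priority list with a membership test per entry plus a separate first-key fallback, B builds a rank table once and selects min(keys, key=rank) in a single pass over the dict's keys; min's first-minimal rule subsumes both the priority order and the first-key fallback.
import Mathlib
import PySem

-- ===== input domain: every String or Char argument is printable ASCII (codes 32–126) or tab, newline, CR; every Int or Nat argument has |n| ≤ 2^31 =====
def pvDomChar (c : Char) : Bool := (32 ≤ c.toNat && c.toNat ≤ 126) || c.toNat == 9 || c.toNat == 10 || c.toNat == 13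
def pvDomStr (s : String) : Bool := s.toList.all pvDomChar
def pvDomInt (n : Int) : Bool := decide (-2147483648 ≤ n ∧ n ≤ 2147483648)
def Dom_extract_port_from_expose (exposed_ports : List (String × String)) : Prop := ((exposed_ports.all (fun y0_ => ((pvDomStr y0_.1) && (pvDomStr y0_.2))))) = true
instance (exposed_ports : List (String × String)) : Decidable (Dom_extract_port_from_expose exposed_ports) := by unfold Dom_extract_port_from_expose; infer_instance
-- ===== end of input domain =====

-- B replaces A's scan of the priority list (a membership test per entry plus a separate
-- first-key fallback) by one min-by-rank pass over the dict's keys; equivalence is proved here.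

-- shared helper: `s.split('/')[0]` (both Pythons contain this exact expression)
def pvSplitSlash0 (s : String) : String :=
  match PySem.Str.split? s "/" with
  | some (h :: _) => h
  | _ => ""  -- unreachable: split with a non-empty separator returns a non-empty list

-- ===== PORT A =====
def pvPriorityPorts : List String :=
  ["80/tcp", "8080/tcp", "3000/tcp", "8000/tcp", "5000/tcp", "443/tcp"]

-- the `for port in priority_ports` loop: first priority port present among the keys
def pvGoA (pr : List String) (keys : List String) : Option String :=
  match pr with
  | [] => none
  | p :: rest => if p ∈ keys then some (pvSplitSlash0 p) else pvGoA rest keys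

def extract_port_from_expose (exposed_ports : List (String × String)) : String :=
  match exposed_ports with
  | [] => "80"
  | (k, _) :: _ =>
    match pvGoA pvPriorityPorts (exposed_ports.map Prod.fst) with
    | some r => r
    | none => pvSplitSlash0 k  -- first_port = list(exposed_ports.keys())[0]

-- ===== PORT B =====
def pvPriorityB : List String :=
  ["80/tcp", "8080/tcp", "3000/tcp", "8000/tcp", "5000/tcp", "443/tcp"]

-- rank = {p: i for i, p in enumerate(priority_ports)}
def pvRank : PySem.Dict String Int :=
  (PySem.List.enumerate pvPriorityB 0).foldl (fun d ip => d.insert ip.2 ip.1) PySem.Dict.empty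

def extract_port_from_expose_alt (exposed_ports : List (String × String)) : String :=
  match exposed_ports with
  | [] => "80"
  | _ :: _ =>
    -- best = min(exposed_ports, key=lambda p: rank.get(p, len(priority_ports)))
    match PySem.List.min? (exposed_ports.map Prod.fst)
        (fun p => pvRank.getD p ((pvPriorityB.length : Nat) : Int)) with
    | some best => pvSplitSlash0 best
    | none => "80"  -- unreachable: the list is non-empty

-- ===== PRECONDITION & SPEC =====
def Spec_extract_port_from_expose (exposed_ports : List (String × String)) (out : String) : Prop := out = extract_port_from_expose_alt exposed_ports
instance (exposed_ports : List (String × String)) (out : String) : Decidable (Spec_extract_port_from_expose exposed_ports out) := by unfold Spec_extract_port_from_expose; infer_instance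

-- ===== CLAIM (what is proved, stated in full; the proofs are below) =====
def Claim_equal_extract_port_from_expose : Prop := ∀ (exposed_ports : List (String × String)), Dom_extract_port_from_expose exposed_ports → Spec_extract_port_from_expose exposed_ports (extract_port_from_expose exposed_ports)

-- ===== LEMMAS AND PROOFS =====

-- the rank function, written out: position in the priority list, 6 if absent
def pvRk (q : String) : Int :=
  if q = "80/tcp" then 0
  else if q = "8080/tcp" then 1
  else if q = "3000/tcp" then 2
  else if q = "8000/tcp" then 3
  else if q = "5000/tcp" then 4
  else if q = "443/tcp" then 5
  else 6

lemma pvKey_eq (q : String) :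
    pvRank.getD q ((pvPriorityB.length : Nat) : Int) = pvRk q := by
  have h : pvRank = { items := [("80/tcp", (0 : Int)), ("8080/tcp", 1), ("3000/tcp", 2),
      ("8000/tcp", 3), ("5000/tcp", 4), ("443/tcp", 5)] } := by rfl
  by_cases h0 : q = "80/tcp"
  · subst h0; decide
  by_cases h1 : q = "8080/tcp"
  · subst h1; decide
  by_cases h2 : q = "3000/tcp"
  · subst h2; decide
  by_cases h3 : q = "8000/tcp"
  · subst h3; decide
  by_cases h4 : q = "5000/tcp"
  · subst h4; decide
  by_cases h5 : q = "443/tcp"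
  · subst h5; decide
  rw [h]
  simp [PySem.Dict.getD_eq_get?_getD, PySem.Dict.get?,
    pvRk, pvPriorityB, h0, h1, h2, h3, h4, h5,
    Ne.symm h0, Ne.symm h1, Ne.symm h2, Ne.symm h3, Ne.symm h4, Ne.symm h5]

lemma pvRk_cases (q : String) :
    (q = "80/tcp" ∧ pvRk q = 0) ∨ (q = "8080/tcp" ∧ pvRk q = 1) ∨
    (q = "3000/tcp" ∧ pvRk q = 2) ∨ (q = "8000/tcp" ∧ pvRk q = 3) ∨
    (q = "5000/tcp" ∧ pvRk q = 4) ∨ (q = "443/tcp" ∧ pvRk q = 5) ∨ pvRk q = 6 := by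
  unfold pvRk; split_ifs with a b c d e g <;> simp_all

lemma pvRkLit0 : pvRk "80/tcp" = 0 := by decide
lemma pvRkLit1 : pvRk "8080/tcp" = 1 := by decide
lemma pvRkLit2 : pvRk "3000/tcp" = 2 := by decide
lemma pvRkLit3 : pvRk "8000/tcp" = 3 := by decide
lemma pvRkLit4 : pvRk "5000/tcp" = 4 := by decide
lemma pvRkLit5 : pvRk "443/tcp" = 5 := by decide

-- min?'s fold keeps its accumulator when nothing strictly beats it
lemma pvFoldlStay (f : String → Int) (g : Option String → String → Option String)
    (hg : ∀ (m' : String) (x : String), g (some m') x = if f x < f m' then some x else some m')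
    (t : List String) (m : String) (h : ∀ y ∈ t, ¬ f y < f m) :
    t.foldl g (some m) = some m := by
  induction t with
  | nil => rfl
  | cons y t ih =>
    have hy : ¬ f y < f m := h y (List.mem_cons_self ..)
    rw [List.foldl_cons, hg, if_neg hy]
    exact ih (fun z hz => h z (List.mem_cons_of_mem _ hz))

lemma pvMinHead (f : String → Int) (k : String) (t : List String)
    (h : ∀ y ∈ t, ¬ f y < f k) :
    PySem.List.min? (k :: t) f = some k := by
  unfold PySem.List.min?
  rw [List.foldl_cons]
  exact pvFoldlStay f _ (fun m' x => rfl) t k h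

lemma pvMinSelect (f : String → Int) (keys : List String) (p : String)
    (hp : p ∈ keys) (hmin : ∀ q ∈ keys, f p ≤ f q)
    (huniq : ∀ q ∈ keys, f q = f p → q = p) :
    PySem.List.min? keys f = some p := by
  cases h : PySem.List.min? keys f with
  | none =>
    rw [PySem.List.min?_eq_none_iff] at h
    subst h; exact absurd hp (List.not_mem_nil)
  | some r =>
    have hr : r ∈ keys := PySem.List.min?_mem h
    have h1 : f r ≤ f p := PySem.List.min?_isMin h p hp
    have h2 : f p ≤ f r := hmin r hr
    exact congrArg some (huniq r hr (le_antisymm h1 h2))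

lemma pvMain (xs : List (String × String)) :
    extract_port_from_expose xs = extract_port_from_expose_alt xs := by
  match xs with
  | [] => rfl
  | (k, v) :: t =>
    unfold extract_port_from_expose extract_port_from_expose_alt
    simp only [List.map_cons, pvKey_eq]
    by_cases h0 : "80/tcp" ∈ k :: t.map Prod.fst
    · have hm : ∀ q ∈ k :: t.map Prod.fst, pvRk "80/tcp" ≤ pvRk q := by
        intro q hq
        rw [pvRkLit0]
        rcases pvRk_cases q with ⟨rfl,hv⟩|⟨rfl,hv⟩|⟨rfl,hv⟩|⟨rfl,hv⟩|⟨rfl,hv⟩|⟨rfl,hv⟩|hv <;>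
          first | exact absurd hq h0 | exact absurd hq h1 | exact absurd hq h2 | exact absurd hq h3 | exact absurd hq h4 | exact absurd hq h5 | ((rw [hv]); try omega)
      have hu : ∀ q ∈ k :: t.map Prod.fst, pvRk q = pvRk "80/tcp" → q = "80/tcp" := by
        intro q hq he
        rw [pvRkLit0] at he
        rcases pvRk_cases q with ⟨rfl,hv⟩|⟨rfl,hv⟩|⟨rfl,hv⟩|⟨rfl,hv⟩|⟨rfl,hv⟩|⟨rfl,hv⟩|hv <;>
          first | rfl | (rw [hv] at he; omega)
      rw [pvMinSelect pvRk (k :: t.map Prod.fst) "80/tcp" h0 hm hu]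
      simp [pvGoA, pvPriorityPorts, h0]

    by_cases h1 : "8080/tcp" ∈ k :: t.map Prod.fst
    · have hm : ∀ q ∈ k :: t.map Prod.fst, pvRk "8080/tcp" ≤ pvRk q := by
        intro q hq
        rw [pvRkLit1]
        rcases pvRk_cases q with ⟨rfl,hv⟩|⟨rfl,hv⟩|⟨rfl,hv⟩|⟨rfl,hv⟩|⟨rfl,hv⟩|⟨rfl,hv⟩|hv <;>
          first | exact absurd hq h0 | exact absurd hq h1 | exact absurd hq h2 | exact absurd hq h3 | exact absurd hq h4 | exact absurd hq h5 | ((rw [hv]); try omega)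
      have hu : ∀ q ∈ k :: t.map Prod.fst, pvRk q = pvRk "8080/tcp" → q = "8080/tcp" := by
        intro q hq he
        rw [pvRkLit1] at he
        rcases pvRk_cases q with ⟨rfl,hv⟩|⟨rfl,hv⟩|⟨rfl,hv⟩|⟨rfl,hv⟩|⟨rfl,hv⟩|⟨rfl,hv⟩|hv <;>
          first | rfl | (rw [hv] at he; omega)
      rw [pvMinSelect pvRk (k :: t.map Prod.fst) "8080/tcp" h1 hm hu]
      simp [pvGoA, pvPriorityPorts, h0, h1]

    by_cases h2 : "3000/tcp" ∈ k :: t.map Prod.fst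
    · have hm : ∀ q ∈ k :: t.map Prod.fst, pvRk "3000/tcp" ≤ pvRk q := by
        intro q hq
        rw [pvRkLit2]
        rcases pvRk_cases q with ⟨rfl,hv⟩|⟨rfl,hv⟩|⟨rfl,hv⟩|⟨rfl,hv⟩|⟨rfl,hv⟩|⟨rfl,hv⟩|hv <;>
          first | exact absurd hq h0 | exact absurd hq h1 | exact absurd hq h2 | exact absurd hq h3 | exact absurd hq h4 | exact absurd hq h5 | ((rw [hv]); try omega)
      have hu : ∀ q ∈ k :: t.map Prod.fst, pvRk q = pvRk "3000/tcp" → q = "3000/tcp" := by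
        intro q hq he
        rw [pvRkLit2] at he
        rcases pvRk_cases q with ⟨rfl,hv⟩|⟨rfl,hv⟩|⟨rfl,hv⟩|⟨rfl,hv⟩|⟨rfl,hv⟩|⟨rfl,hv⟩|hv <;>
          first | rfl | (rw [hv] at he; omega)
      rw [pvMinSelect pvRk (k :: t.map Prod.fst) "3000/tcp" h2 hm hu]
      simp [pvGoA, pvPriorityPorts, h0, h1, h2]

    by_cases h3 : "8000/tcp" ∈ k :: t.map Prod.fst
    · have hm : ∀ q ∈ k :: t.map Prod.fst, pvRk "8000/tcp" ≤ pvRk q := by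
        intro q hq
        rw [pvRkLit3]
        rcases pvRk_cases q with ⟨rfl,hv⟩|⟨rfl,hv⟩|⟨rfl,hv⟩|⟨rfl,hv⟩|⟨rfl,hv⟩|⟨rfl,hv⟩|hv <;>
          first | exact absurd hq h0 | exact absurd hq h1 | exact absurd hq h2 | exact absurd hq h3 | exact absurd hq h4 | exact absurd hq h5 | ((rw [hv]); try omega)
      have hu : ∀ q ∈ k :: t.map Prod.fst, pvRk q = pvRk "8000/tcp" → q = "8000/tcp" := by
        intro q hq he
        rw [pvRkLit3] at he
        rcases pvRk_cases q with ⟨rfl,hv⟩|⟨rfl,hv⟩|⟨rfl,hv⟩|⟨rfl,hv⟩|⟨rfl,hv⟩|⟨rfl,hv⟩|hv <;>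
          first | rfl | (rw [hv] at he; omega)
      rw [pvMinSelect pvRk (k :: t.map Prod.fst) "8000/tcp" h3 hm hu]
      simp [pvGoA, pvPriorityPorts, h0, h1, h2, h3]

    by_cases h4 : "5000/tcp" ∈ k :: t.map Prod.fst
    · have hm : ∀ q ∈ k :: t.map Prod.fst, pvRk "5000/tcp" ≤ pvRk q := by
        intro q hq
        rw [pvRkLit4]
        rcases pvRk_cases q with ⟨rfl,hv⟩|⟨rfl,hv⟩|⟨rfl,hv⟩|⟨rfl,hv⟩|⟨rfl,hv⟩|⟨rfl,hv⟩|hv <;>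
          first | exact absurd hq h0 | exact absurd hq h1 | exact absurd hq h2 | exact absurd hq h3 | exact absurd hq h4 | exact absurd hq h5 | ((rw [hv]); try omega)
      have hu : ∀ q ∈ k :: t.map Prod.fst, pvRk q = pvRk "5000/tcp" → q = "5000/tcp" := by
        intro q hq he
        rw [pvRkLit4] at he
        rcases pvRk_cases q with ⟨rfl,hv⟩|⟨rfl,hv⟩|⟨rfl,hv⟩|⟨rfl,hv⟩|⟨rfl,hv⟩|⟨rfl,hv⟩|hv <;>
          first | rfl | (rw [hv] at he; omega)
      rw [pvMinSelect pvRk (k :: t.map Prod.fst) "5000/tcp" h4 hm hu]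
      simp [pvGoA, pvPriorityPorts, h0, h1, h2, h3, h4]

    by_cases h5 : "443/tcp" ∈ k :: t.map Prod.fst
    · have hm : ∀ q ∈ k :: t.map Prod.fst, pvRk "443/tcp" ≤ pvRk q := by
        intro q hq
        rw [pvRkLit5]
        rcases pvRk_cases q with ⟨rfl,hv⟩|⟨rfl,hv⟩|⟨rfl,hv⟩|⟨rfl,hv⟩|⟨rfl,hv⟩|⟨rfl,hv⟩|hv <;>
          first | exact absurd hq h0 | exact absurd hq h1 | exact absurd hq h2 | exact absurd hq h3 | exact absurd hq h4 | exact absurd hq h5 | ((rw [hv]); try omega)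
      have hu : ∀ q ∈ k :: t.map Prod.fst, pvRk q = pvRk "443/tcp" → q = "443/tcp" := by
        intro q hq he
        rw [pvRkLit5] at he
        rcases pvRk_cases q with ⟨rfl,hv⟩|⟨rfl,hv⟩|⟨rfl,hv⟩|⟨rfl,hv⟩|⟨rfl,hv⟩|⟨rfl,hv⟩|hv <;>
          first | rfl | (rw [hv] at he; omega)
      rw [pvMinSelect pvRk (k :: t.map Prod.fst) "443/tcp" h5 hm hu]
      simp [pvGoA, pvPriorityPorts, h0, h1, h2, h3, h4, h5]

    · have hsix : ∀ q ∈ k :: t.map Prod.fst, pvRk q = 6 := by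
        intro q hq
        rcases pvRk_cases q with ⟨rfl,hv⟩|⟨rfl,hv⟩|⟨rfl,hv⟩|⟨rfl,hv⟩|⟨rfl,hv⟩|⟨rfl,hv⟩|hv <;>
          first | exact absurd hq h0 | exact absurd hq h1 | exact absurd hq h2 | exact absurd hq h3 | exact absurd hq h4 | exact absurd hq h5 | exact hv
      rw [pvMinHead pvRk k (t.map Prod.fst) (fun y hy => by
        rw [hsix y (List.mem_cons_of_mem _ hy), hsix k (List.mem_cons_self ..)]; omega)]
      simp [pvGoA, pvPriorityPorts, h0, h1, h2, h3, h4, h5]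

-- ===== VERDICT (by name: the statement is the Claim_ definition above) =====
theorem extract_port_from_expose_spec : Claim_equal_extract_port_from_expose := by
  intro xs _
  unfold Spec_extract_port_from_expose
  exact pvMain xs
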